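-- pv_equiv track=rewrite | github.com/necst/qabe | QuadraticAssignment/quadraticAssignment.py | modified_squared_pol
-- ===== SOURCE A (Python) =====
-- def modified_squared_pol(coeff,offset):
--   """
--   Returns a dictionary containing all the terms and
--   their coefficients (as key value pairs) of the squared
--   polynomial represented by the coefficients' list in input.
--   To the terms considered is applied an offset to shift their
--   indexes accordingly.
--   """
--   n = len(coeff) - 1
--   squared_coeff = {}
--
--   #squared terms(a_i^2)
--   for i in range(n):
--     index = i*offset
--     squared_coeff[f"x{index+1}@2"] = coeff[i] * coeff[i]
--
--   #cross terms(a_i * a_j)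
--   for i in range(n):
--     for j in range(i + 1, n):
--       index_i = i*offset
--       index_j = j*offset
--       squared_coeff[f"x{1+index_i}x{1+index_j}"] = 2 * coeff[i] * coeff[j]
--
--   #costant multiplying terms (a_i * c)
--   for i in range(n):
--     index = i*offset
--     squared_coeff[f"x{index+1}c"] = 2 * coeff[i] * coeff[-1]
--
--   #constant squared (c^2)
--   squared_coeff["c^2"] = coeff[-1] ** 2
--
--   return squared_coeff
-- ===== SOURCE B (Python) =====
-- def modified_squared_pol(coeff, offset):
--     *cs, c = coeff
--     pairs = [(f"x{i * offset + 1}", a) for i, a in enumerate(cs)]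
--     entries = [(nm + "@2", a * a) for nm, a in pairs]
--     rest = pairs
--     while rest:
--         (ni, a), rest = rest[0], rest[1:]
--         entries += [(ni + nj, 2 * a * b) for nj, b in rest]
--     entries += [(nm + "c", 2 * a * c) for nm, a in pairs]
--     entries.append(("c^2", c * c))
--     return dict(entries)
-- ===== Notes on version B (the rewrite author's own statement) =====
-- stated objective: simpler
-- what changed: A mutates a dict inside four index-based loops (including a nested index pair loop) with keys re-formatted at every write; B precomputes the variable-name/coefficient pair table once, builds the entry list directly (cross terms by a head/tail loop over the remaining pairs), and constructs the dict in one shot at the end.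
-- outside the precondition, e.g. on modified_squared_pol([], 5): A raises IndexError, B raises ValueError
import Mathlib
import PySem

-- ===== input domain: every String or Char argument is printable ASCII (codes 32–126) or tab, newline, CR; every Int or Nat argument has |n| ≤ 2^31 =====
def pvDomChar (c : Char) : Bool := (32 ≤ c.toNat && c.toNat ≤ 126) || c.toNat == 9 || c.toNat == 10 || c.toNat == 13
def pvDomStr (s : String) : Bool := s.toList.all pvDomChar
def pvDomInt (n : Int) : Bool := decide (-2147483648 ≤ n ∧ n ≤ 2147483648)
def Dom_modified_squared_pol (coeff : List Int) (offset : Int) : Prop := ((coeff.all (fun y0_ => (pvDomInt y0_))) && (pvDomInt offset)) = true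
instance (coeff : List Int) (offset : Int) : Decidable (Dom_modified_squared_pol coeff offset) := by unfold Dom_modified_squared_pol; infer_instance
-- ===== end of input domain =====

-- B replaces A's four dict-mutating index loops by building the entry list directly
-- (precomputed name/value pair table, head/tail recursion for the cross terms) and making one dict at the end; objective: simpler.

-- ===== PORT A =====
def modified_squared_pol (coeff : List Int) (offset : Int) : List (String × Int) :=
  let n : Int := (coeff.length : Int) - 1
  let d : PySem.Dict String Int := PySem.Dict.empty
  -- squared terms (a_i^2)
  let d := (PySem.List.pyRange 0 n).foldl (fun d i =>
    let index := i * offset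
    d.insert ("x" ++ PySem.Int.toStr (index + 1) ++ "@2")
      (PySem.List.pyGetD coeff i 0 * PySem.List.pyGetD coeff i 0)) d
  -- cross terms (a_i * a_j)
  let d := (PySem.List.pyRange 0 n).foldl (fun d i =>
    (PySem.List.pyRange (i + 1) n).foldl (fun d j =>
      let index_i := i * offset
      let index_j := j * offset
      d.insert ("x" ++ PySem.Int.toStr (1 + index_i) ++ "x" ++ PySem.Int.toStr (1 + index_j))
        (2 * PySem.List.pyGetD coeff i 0 * PySem.List.pyGetD coeff j 0)) d) d
  -- constant multiplying terms (a_i * c)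
  let d := (PySem.List.pyRange 0 n).foldl (fun d i =>
    let index := i * offset
    d.insert ("x" ++ PySem.Int.toStr (index + 1) ++ "c")
      (2 * PySem.List.pyGetD coeff i 0 * PySem.List.pyGetD coeff (-1) 0)) d
  -- constant squared (c^2)
  let d := d.insert "c^2" (PySem.List.pyGetD coeff (-1) 0 ^ 2)
  d.items

-- ===== PORT B =====
-- the 'while rest:' loop of Source B: pair the head name with every later name, recurse on the tail
def crossTerms (l : List (String × Int)) : List (String × Int) :=
  match l with
  | [] => []
  | (ni, a) :: rest => rest.map (fun p => (ni ++ p.1, 2 * a * p.2)) ++ crossTerms rest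

def modified_squared_pol_alt (coeff : List Int) (offset : Int) : List (String × Int) :=
  let cs := coeff.dropLast                    -- *cs, c = coeff
  let c := coeff.getLastD 0
  let pairs := (PySem.List.enumerate cs).map (fun p => ("x" ++ PySem.Int.toStr (p.1 * offset + 1), p.2))
  let entries := pairs.map (fun p => (p.1 ++ "@2", p.2 * p.2))
  let entries := entries ++ crossTerms pairs
  let entries := entries ++ pairs.map (fun p => (p.1 ++ "c", 2 * p.2 * c))
  let entries := entries ++ [("c^2", c * c)]
  (PySem.Dict.ofList entries).items

-- ===== PRECONDITION & SPEC =====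
-- Pre_ excludes only the empty list, on which A raises IndexError at coeff[-1] (and Source B's unpacking raises ValueError).
def Pre_modified_squared_pol (coeff : List Int) (offset : Int) : Prop := coeff ≠ []
instance (coeff : List Int) (offset : Int) : Decidable (Pre_modified_squared_pol coeff offset) := by unfold Pre_modified_squared_pol; infer_instance
def pvWitness_modified_squared_pol : List Int × Int := ([3, -2, 5], 2)

def Spec_modified_squared_pol (coeff : List Int) (offset : Int) (out : List (String × Int)) : Prop := out = modified_squared_pol_alt coeff offset
instance (coeff : List Int) (offset : Int) (out : List (String × Int)) : Decidable (Spec_modified_squared_pol coeff offset out) := by unfold Spec_modified_squared_pol; infer_instance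

-- ===== CLAIM (what is proved, stated in full; the proofs are below) =====
def Claim_equal_modified_squared_pol : Prop := ∀ (coeff : List Int) (offset : Int), Dom_modified_squared_pol coeff offset → Pre_modified_squared_pol coeff offset → Spec_modified_squared_pol coeff offset (modified_squared_pol coeff offset)

-- ===== LEMMAS AND PROOFS =====

-- coeff[-1] on a nonempty list is its last element
lemma pyGetD_neg_one_eq_getLastD (coeff : List Int) (h : coeff ≠ []) :
    PySem.List.pyGetD coeff (-1) 0 = coeff.getLastD 0 := by
  have hlen : 0 < coeff.length := List.length_pos_iff.mpr h
  simp only [PySem.List.pyGetD, PySem.List.pyGet?, PySem.List.pyIdx?]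
  rw [if_neg (by omega), if_pos (by omega)]
  simp [List.getLastD_eq_getLast?, List.getLast?_eq_getElem?]

-- reading inside the dropLast prefix is reading the original list
lemma pyGetD_dropLast (l : List Int) (i : Int) (h0 : 0 ≤ i) (h1 : i < (l.length : Int) - 1) :
    PySem.List.pyGetD l i 0 = PySem.List.pyGetD l.dropLast i 0 := by
  obtain ⟨k, rfl⟩ := Int.eq_ofNat_of_zero_le h0
  rw [PySem.List.pyGetD_natCast, PySem.List.pyGetD_natCast]
  rw [List.getD_eq_getElem?_getD, List.getD_eq_getElem?_getD,
    List.getElem?_eq_getElem (l := l) (by omega), List.getElem?_eq_getElem (by simp; omega)]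
  simp [List.getElem_dropLast]

-- the head/tail cross-term recursion over a mapped range is the row-major upper triangle
lemma crossTerms_pyRange (Q : Int → String × Int) :
    ∀ (m : Nat) (s : Int),
      crossTerms ((PySem.List.pyRange s (s + (m : Int))).map Q) =
      ((PySem.List.pyRange s (s + (m : Int))).map (fun i =>
        (PySem.List.pyRange (i + 1) (s + (m : Int))).map
          (fun j => ((Q i).1 ++ (Q j).1, 2 * (Q i).2 * (Q j).2)))).flatten := by
  intro m
  induction m with
  | zero => intro s; simp [PySem.List.pyRange_one, crossTerms]
  | succ m ih =>
    intro s
    have hb : (s : Int) + ((m : Nat) + 1 : Nat) = (s + 1) + (m : Int) := by push_cast; ring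
    have hlt : s < s + ((m : Nat) + 1 : Nat) := by push_cast; omega
    rw [PySem.List.pyRange_one_cons hlt]
    simp only [List.map_cons, List.flatten_cons, crossTerms]
    rw [hb, ih (s + 1)]
    simp [List.map_map]

-- foldl congruence in both the initial state and the body
lemma foldl_congr_mem_init {α β : Type} (l : List α) (f g : β → α → β) (i1 i2 : β) (hi : i1 = i2)
    (h : ∀ acc : β, ∀ x ∈ l, f acc x = g acc x) : l.foldl f i1 = l.foldl g i2 := by
  subst hi; exact PySem.List.foldl_congr_mem l f g i1 h

lemma ofList_foldl (l : List (String × Int)) :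
    PySem.Dict.ofList l = l.foldl (fun d p => d.insert p.1 p.2) (PySem.Dict.empty : PySem.Dict String Int) := rfl

lemma main_eq (coeff : List Int) (offset : Int) (h : coeff ≠ []) :
    modified_squared_pol coeff offset = modified_squared_pol_alt coeff offset := by
  have hlen : 0 < coeff.length := List.length_pos_iff.mpr h
  have hm : coeff.dropLast.length = coeff.length - 1 := List.length_dropLast
  set m := coeff.dropLast.length with hmdef
  have hn : ((coeff.length : Int) - 1) = (m : Int) := by omega
  simp only [modified_squared_pol, modified_squared_pol_alt, hn,
    PySem.List.enumerate_eq_map_pyRange coeff.dropLast 0, PySem.List.len_eq,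
    List.map_map, Function.comp_def]
  rw [show ((m : Nat) : Int) = 0 + (m : Int) by ring]
  rw [crossTerms_pyRange (fun j => ("x" ++ PySem.Int.toStr (j * offset + 1), PySem.List.pyGetD coeff.dropLast j 0)) m 0]
  rw [ofList_foldl]
  simp only [List.foldl_append, List.foldl_map, List.foldl_flatten, List.foldl_cons, List.foldl_nil]
  refine congrArg _ ?_
  rw [pyGetD_neg_one_eq_getLastD coeff h, sq (coeff.getLastD 0)]
  congr 1
  refine foldl_congr_mem_init _ _ _ _ _ ?_ ?_
  · -- squared-terms stage and cross-terms stage as the initial state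
    refine foldl_congr_mem_init _ _ _ _ _ ?_ ?_
    · -- squared terms
      refine foldl_congr_mem_init _ _ _ _ _ rfl ?_
      intro acc i hi
      obtain ⟨h0, h1⟩ := PySem.List.mem_pyRange_one.mp hi
      rw [pyGetD_dropLast coeff i h0 (by omega)]
    · -- cross terms
      intro acc i hi
      obtain ⟨h0, h1⟩ := PySem.List.mem_pyRange_one.mp hi
      refine PySem.List.foldl_congr_mem _ _ _ _ ?_
      intro acc2 j hj
      obtain ⟨h0j, h1j⟩ := PySem.List.mem_pyRange_one.mp hj
      rw [Int.add_comm 1 (i * offset), Int.add_comm 1 (j * offset),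
        pyGetD_dropLast coeff i h0 (by omega), pyGetD_dropLast coeff j (by omega) (by omega)]
      simp [String.append_assoc]
  · -- constant multiplying terms
    intro acc i hi
    obtain ⟨h0, h1⟩ := PySem.List.mem_pyRange_one.mp hi
    rw [pyGetD_dropLast coeff i h0 (by omega)]

-- ===== VERDICT (by name: the statement is the Claim_ definition above) =====
theorem modified_squared_pol_spec : Claim_equal_modified_squared_pol := by
  intro coeff offset _ hpre
  exact (main_eq coeff offset hpre).symm ▸ rfl
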